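-- pv_equiv track=rewrite | github.com/ajpotts01/gcp-pde-python-side-inputs-dataflow | src/common/pipeline_methods.py | java_package_name_split
-- ===== SOURCE A (Python) =====
-- def java_package_name_split(package_name: str) -> list[str]:
--     """
--     Splits a fully qualified Java package name into its parts, e.g.:
--         com.example.appname.library.widgetname becomes:
--         [
--             "com",
--             "com.example",
--             "com.example.appname",
--             "com.example.appname.library",
--             "com.example.appname.library.widgetname"
--         ]
--
--     This is based on Google's Apache Beam examples.
--
--     :param str package_name: Fully qualified Java package name
--     :return list[str] result: List of Java packages split up as per the above example
--     """
--     PACKAGE_SEP = "."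
--
--     # Google's original example does a classic loop and shifting along the package separator indices gradually
--     # This can be done with classic list comprehensions
--     separator_indices = [
--         index for index, char in enumerate(package_name) if char == PACKAGE_SEP
--     ]
--     result = [package_name[0:next_index] for next_index in separator_indices]
--
--     # Don't forget the package name itself
--     result.append(package_name)
--
--     return result
-- ===== SOURCE B (Python) =====
-- def java_package_name_split(package_name: str) -> list[str]:
--     # Single left-to-right pass: grow the prefix char by char and emit it
--     # whenever the next char is a separator; no index scan, no slicing.
--     result = []
--     prefix = ""
--     for ch in package_name:
--         if ch == ".":
--             result.append(prefix)
--         prefix += ch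
--     result.append(package_name)
--     return result
-- ===== Notes on version B (the rewrite author's own statement) =====
-- stated objective: alternative
-- what changed: Replaces the two-pass enumerate-for-dot-indices-then-slice construction with a single fold over the characters that carries the growing prefix and emits it at each separator.
import Mathlib
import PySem

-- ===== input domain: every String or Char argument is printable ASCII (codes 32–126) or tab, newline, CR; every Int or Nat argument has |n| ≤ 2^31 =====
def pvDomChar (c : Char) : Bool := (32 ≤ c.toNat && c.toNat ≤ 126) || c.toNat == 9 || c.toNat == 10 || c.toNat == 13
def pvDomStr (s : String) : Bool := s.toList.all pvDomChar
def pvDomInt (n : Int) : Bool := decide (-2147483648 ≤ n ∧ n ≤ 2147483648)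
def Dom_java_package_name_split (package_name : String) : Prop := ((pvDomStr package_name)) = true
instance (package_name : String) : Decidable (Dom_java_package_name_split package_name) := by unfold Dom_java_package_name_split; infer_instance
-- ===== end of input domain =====

-- B replaces A's enumerate-dot-indices-then-slice construction by one fold over the
-- characters that carries the growing prefix and emits it at each separator (alternative).

-- ===== PORT A =====
def java_package_name_split (package_name : String) : List String :=
  -- separator_indices = [index for index, char in enumerate(package_name) if char == "."]
  let separator_indices : List Int :=
    ((PySem.List.enumerate package_name.toList 0).filter (fun p => p.2 == '.')).map (fun p => p.1)
  -- result = [package_name[0:next_index] for next_index in separator_indices]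
  let result : List String :=
    separator_indices.map (fun next_index =>
      String.ofList (PySem.List.slice package_name.toList (some 0) (some next_index)))
  -- result.append(package_name)
  result ++ [package_name]

-- ===== PORT B =====
def java_package_name_split_alt (package_name : String) : List String :=
  -- state: (result, prefix); for ch in package_name: if ch == '.': result.append(prefix); prefix += ch
  let st := package_name.toList.foldl
    (fun (st : List String × List Char) ch =>
      (if ch == '.' then st.1 ++ [String.ofList st.2] else st.1, st.2 ++ [ch]))
    ([], [])
  st.1 ++ [package_name]

-- ===== PRECONDITION & SPEC =====
def Spec_java_package_name_split (package_name : String) (out : List String) : Prop := out = java_package_name_split_alt package_name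
instance (package_name : String) (out : List String) : Decidable (Spec_java_package_name_split package_name out) := by unfold Spec_java_package_name_split; infer_instance

-- ===== CLAIM (what is proved, stated in full; the proofs are below) =====
def Claim_equal_java_package_name_split : Prop := ∀ (package_name : String), Dom_java_package_name_split package_name → Spec_java_package_name_split package_name (java_package_name_split package_name)

-- ===== LEMMAS AND PROOFS =====

-- Proof-only helper: the prefixes of `pre ++ cs` emitted at each '.' of cs.
def dotPrefixes (pre : List Char) : List Char → List String
  | [] => []
  | c :: rest => (if c = '.' then [String.ofList pre] else []) ++ dotPrefixes (pre ++ [c]) rest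

lemma fold_eq_dotPrefixes (cs : List Char) (acc : List String) (pre : List Char) :
    cs.foldl (fun (st : List String × List Char) ch =>
        (if ch == '.' then st.1 ++ [String.ofList st.2] else st.1, st.2 ++ [ch])) (acc, pre)
      = (acc ++ dotPrefixes pre cs, pre ++ cs) := by
  induction cs generalizing acc pre with
  | nil => simp [dotPrefixes]
  | cons c rest ih =>
      simp only [List.foldl_cons, ih, dotPrefixes]
      by_cases h : c = '.' <;> simp [h]

lemma mapA_eq_dotPrefixes (cs : List Char) (pre : List Char) :
    ((PySem.List.enumerate cs (pre.length : Int)).filter (fun p => p.2 == '.')).map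
        (fun p => String.ofList (PySem.List.slice (pre ++ cs) none (some p.1)))
      = dotPrefixes pre cs := by
  induction cs generalizing pre with
  | nil => simp [PySem.List.enumerate_nil, dotPrefixes]
  | cons c rest ih =>
      have hslice : PySem.List.slice (pre ++ c :: rest) none (some (pre.length : Int)) = pre := by
        rw [PySem.List.slice_to_natCast]
        simp
      have h2 := ih (pre ++ [c])
      simp only [List.append_assoc, List.singleton_append, List.length_append,
        List.length_cons, List.length_nil, Nat.cast_add, Nat.cast_one, zero_add] at h2
      rw [PySem.List.enumerate_cons, List.filter_cons]
      by_cases h : c = '.'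
      · subst h
        simp [dotPrefixes, hslice, h2]
      · simp [dotPrefixes, h, h2]

-- ===== VERDICT (by name: the statement is the Claim_ definition above) =====
theorem java_package_name_split_spec : Claim_equal_java_package_name_split := by
  intro s _
  unfold Spec_java_package_name_split java_package_name_split java_package_name_split_alt
  rw [fold_eq_dotPrefixes]
  simp only [List.map_map, List.nil_append]
  have := mapA_eq_dotPrefixes s.toList []
  simpa using this
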